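-- pv_equiv track=rewrite | github.com/rrlcs/bnsynth | code/.old_code/utils_old_copy.py | createErrorFormula
-- ===== SOURCE A (Python) =====
-- def createErrorFormula(Xvar, Yvar, UniqueVars, verilog_formula):
--     inputformula = '('
--     inputskolem = '('
--     inputerrorx = 'module MAIN ('
--     inputerrory = ''
--     inputerroryp = ''
--     declarex = ''
--     declarey = ''
--     declareyp = ''
--     for var in Xvar:
--         inputformula += "%s, " % (var)
--         inputskolem += "%s, " % (var)
--         inputerrorx += "%s, " % (var)
--         declarex += "input %s ;\n" % (var)
--     for var in Yvar:
--         inputformula += "%s, " % (var)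
--         inputerrory += "%s, " % (var)
--         declarey += "input %s ;\n" % (var)
--         inputerroryp += "ip%s, " % (var)
--         declareyp += "input ip%s ;\n" % (var)
--         if var in UniqueVars:
--             inputskolem += "%s, " %(var)
--         else:
--             inputskolem += "ip%s, " %(var)
--     inputformula += "out1 );\n"
--     inputformula_sk = inputskolem + "out3 );\n"
--     inputskolem += "out2 );\n"
--     inputerrorx = inputerrorx + inputerrory + inputerroryp + "out );\n"
--     declare = declarex + declarey + declareyp + 'output out;\n' + \
--         "wire out1;\n" + "wire out2;\n" + "wire out3;\n"
--     formula_call = "FORMULA F1 " + inputformula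
--     skolem_call = "SKOLEMFORMULA F2 " + inputskolem
--     formulask_call = "FORMULA F2 " + inputformula_sk
--     error_content = inputerrorx + declare + \
--         formula_call + skolem_call + formulask_call
--     error_content += "assign out = ( out1 & out2 & ~(out3) );\n" + \
--         "endmodule\n"
--     error_content += verilog_formula
--     return error_content
-- ===== SOURCE B (Python) =====
-- def createErrorFormula(Xvar, Yvar, UniqueVars, verilog_formula):
--     uniq = frozenset(UniqueVars)
--
--     def emit():
--         # stream the output tokens in final document order; no intermediate
--         # fragment strings are ever built
--         yield 'module MAIN ('
--         for v in Xvar: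
--             yield v
--             yield ', '
--         for v in Yvar:
--             yield v
--             yield ', '
--         for v in Yvar:
--             yield 'ip'
--             yield v
--             yield ', '
--         yield 'out );\n'
--         for v in Xvar:
--             yield 'input '
--             yield v
--             yield ' ;\n'
--         for v in Yvar:
--             yield 'input '
--             yield v
--             yield ' ;\n'
--         for v in Yvar:
--             yield 'input ip'
--             yield v
--             yield ' ;\n'
--         yield 'output out;\nwire out1;\nwire out2;\nwire out3;\n'
--         yield 'FORMULA F1 ('
--         for v in Xvar:
--             yield v
--             yield ', '
--         for v in Yvar:
--             yield v
--             yield ', '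
--         yield 'out1 );\n'
--         yield 'SKOLEMFORMULA F2 ('
--         for v in Xvar:
--             yield v
--             yield ', '
--         for v in Yvar:
--             if v not in uniq:
--                 yield 'ip'
--             yield v
--             yield ', '
--         yield 'out2 );\n'
--         yield 'FORMULA F2 ('
--         for v in Xvar:
--             yield v
--             yield ', '
--         for v in Yvar:
--             if v not in uniq:
--                 yield 'ip'
--             yield v
--             yield ', '
--         yield 'out3 );\n'
--         yield 'assign out = ( out1 & out2 & ~(out3) );\nendmodule\n'
--         yield verilog_formula
--
--     return ''.join(emit())
-- ===== Notes on version B (the rewrite author's own statement) =====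
-- stated objective: alternative
-- what changed: Replaces A's two fused multi-accumulator loops and named-fragment assembly by a generator that streams the output tokens in final document order (re-traversing Xvar/Yvar per section, with a frozenset for the UniqueVars test) joined once at the end.
import Mathlib
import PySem

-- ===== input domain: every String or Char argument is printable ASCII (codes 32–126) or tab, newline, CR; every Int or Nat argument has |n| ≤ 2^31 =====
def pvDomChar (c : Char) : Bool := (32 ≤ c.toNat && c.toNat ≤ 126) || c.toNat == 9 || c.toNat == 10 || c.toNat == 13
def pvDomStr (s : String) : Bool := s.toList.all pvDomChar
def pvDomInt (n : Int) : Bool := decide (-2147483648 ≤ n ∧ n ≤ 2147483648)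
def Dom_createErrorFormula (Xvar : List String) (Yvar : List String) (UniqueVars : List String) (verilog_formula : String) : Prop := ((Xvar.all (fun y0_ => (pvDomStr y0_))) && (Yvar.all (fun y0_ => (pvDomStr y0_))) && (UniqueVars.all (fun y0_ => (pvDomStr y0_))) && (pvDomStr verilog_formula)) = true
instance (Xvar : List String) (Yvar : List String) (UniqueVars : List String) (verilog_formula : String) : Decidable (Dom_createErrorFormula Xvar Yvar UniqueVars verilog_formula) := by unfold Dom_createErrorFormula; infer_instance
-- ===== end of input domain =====

-- B streams the output as one token list in final document order (no intermediate fragment strings), joined once; objective: alternative.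


-- ===== PORT A =====
-- literal transliteration of A: two fused accumulator loops, then assembly
def createErrorFormula (Xvar : List String) (Yvar : List String) (UniqueVars : List String) (verilog_formula : String) : String :=
  -- x-loop state: (inputformula, inputskolem, inputerrorx, declarex)
  let sx := Xvar.foldl
    (fun (s : String × String × String × String) var =>
      (s.1 ++ var ++ ", ", s.2.1 ++ var ++ ", ", s.2.2.1 ++ var ++ ", ",
       s.2.2.2 ++ "input " ++ var ++ " ;\n"))
    ("(", "(", "module MAIN (", "")
  -- y-loop state: (inputformula, inputskolem, inputerrory, declarey, inputerroryp, declareyp)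
  let sy := Yvar.foldl
    (fun (t : String × String × String × String × String × String) var =>
      (t.1 ++ var ++ ", ",
       (if UniqueVars.contains var then t.2.1 ++ var ++ ", " else t.2.1 ++ "ip" ++ var ++ ", "),
       t.2.2.1 ++ var ++ ", ",
       t.2.2.2.1 ++ "input " ++ var ++ " ;\n",
       t.2.2.2.2.1 ++ "ip" ++ var ++ ", ",
       t.2.2.2.2.2 ++ "input ip" ++ var ++ " ;\n"))
    (sx.1, sx.2.1, "", "", "", "")
  let inputformula := sy.1 ++ "out1 );\n"
  let inputformula_sk := sy.2.1 ++ "out3 );\n"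
  let inputskolem := sy.2.1 ++ "out2 );\n"
  let inputerrorx := sx.2.2.1 ++ sy.2.2.1 ++ sy.2.2.2.2.1 ++ "out );\n"
  let declare := sx.2.2.2 ++ sy.2.2.2.1 ++ sy.2.2.2.2.2 ++ "output out;\n" ++ "wire out1;\n" ++ "wire out2;\n" ++ "wire out3;\n"
  let formula_call := "FORMULA F1 " ++ inputformula
  let skolem_call := "SKOLEMFORMULA F2 " ++ inputskolem
  let formulask_call := "FORMULA F2 " ++ inputformula_sk
  let error_content := inputerrorx ++ declare ++ formula_call ++ skolem_call ++ formulask_call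
  let error_content := error_content ++ "assign out = ( out1 & out2 & ~(out3) );\n" ++ "endmodule\n"
  error_content ++ verilog_formula

-- ===== PORT B =====
-- literal transliteration of B: one token stream in final document order (each
-- 'for v in …: yield …' becomes a flatMap producing the same tokens), joined once
def createErrorFormula_alt (Xvar : List String) (Yvar : List String) (UniqueVars : List String) (verilog_formula : String) : String :=
  let uniq := PySem.Set.ofList UniqueVars
  let toks : List String :=
    ["module MAIN ("] ++
    Xvar.flatMap (fun v => [v, ", "]) ++
    Yvar.flatMap (fun v => [v, ", "]) ++
    Yvar.flatMap (fun v => ["ip", v, ", "]) ++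
    ["out );\n"] ++
    Xvar.flatMap (fun v => ["input ", v, " ;\n"]) ++
    Yvar.flatMap (fun v => ["input ", v, " ;\n"]) ++
    Yvar.flatMap (fun v => ["input ip", v, " ;\n"]) ++
    ["output out;\nwire out1;\nwire out2;\nwire out3;\n", "FORMULA F1 ("] ++
    Xvar.flatMap (fun v => [v, ", "]) ++
    Yvar.flatMap (fun v => [v, ", "]) ++
    ["out1 );\n", "SKOLEMFORMULA F2 ("] ++
    Xvar.flatMap (fun v => [v, ", "]) ++
    Yvar.flatMap (fun v => (if uniq.contains v then [] else ["ip"]) ++ [v, ", "]) ++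
    ["out2 );\n", "FORMULA F2 ("] ++
    Xvar.flatMap (fun v => [v, ", "]) ++
    Yvar.flatMap (fun v => (if uniq.contains v then [] else ["ip"]) ++ [v, ", "]) ++
    ["out3 );\n", "assign out = ( out1 & out2 & ~(out3) );\nendmodule\n", verilog_formula]
  String.join toks

-- ===== PRECONDITION & SPEC =====
def Spec_createErrorFormula (Xvar : List String) (Yvar : List String) (UniqueVars : List String) (verilog_formula : String) (out : String) : Prop := out = createErrorFormula_alt Xvar Yvar UniqueVars verilog_formula
instance (Xvar : List String) (Yvar : List String) (UniqueVars : List String) (verilog_formula : String) (out : String) : Decidable (Spec_createErrorFormula Xvar Yvar UniqueVars verilog_formula out) := by unfold Spec_createErrorFormula; infer_instance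

-- ===== CLAIM =====
def Claim_equal_createErrorFormula : Prop := ∀ (Xvar : List String) (Yvar : List String) (UniqueVars : List String) (verilog_formula : String), Dom_createErrorFormula Xvar Yvar UniqueVars verilog_formula → Spec_createErrorFormula Xvar Yvar UniqueVars verilog_formula (createErrorFormula Xvar Yvar UniqueVars verilog_formula)

-- ===== LEMMAS AND PROOFS =====

theorem pv_foldl_append (l : List String) (s : String) :
    List.foldl (fun r t => r ++ t) s l = s ++ String.join l := by
  induction l generalizing s with
  | nil => rw [List.foldl_nil, String.join, List.foldl_nil, String.append_empty]
  | cons h t ih =>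
      rw [List.foldl_cons, ih]
      conv_rhs => rw [String.join]
      rw [List.foldl_cons, ih]
      simp [String.append_assoc]

theorem pv_join_cons (x : String) (l : List String) :
    String.join (x :: l) = x ++ String.join l := by
  conv_lhs => rw [String.join]
  rw [List.foldl_cons, pv_foldl_append]
  simp

theorem pv_join_append (a b : List String) :
    String.join (a ++ b) = String.join a ++ String.join b := by
  induction a with
  | nil => simp [String.join]
  | cons h t ih => simp [pv_join_cons, ih, String.append_assoc]

-- join of a flatMap = join of the per-element joins
theorem pv_join_flatMap (f : String → List String) (l : List String) :
    String.join (l.flatMap f) = String.join (l.map (fun v => String.join (f v))) := by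
  induction l with
  | nil => simp
  | cons h t ih => simp [List.flatMap_cons, pv_join_append, pv_join_cons, ih]

-- the x-loop accumulates each component independently as accumulator ++ join-of-maps
theorem pv_foldlX (l : List String) (a b c d : String) :
    (l.foldl
      (fun (s : String × String × String × String) var =>
        (s.1 ++ (var ++ ", "), s.2.1 ++ (var ++ ", "), s.2.2.1 ++ (var ++ ", "),
         s.2.2.2 ++ ("input " ++ (var ++ " ;\n"))))
      (a, b, c, d))
    = (a ++ String.join (l.map (fun v => v ++ ", ")),
       b ++ String.join (l.map (fun v => v ++ ", ")),
       c ++ String.join (l.map (fun v => v ++ ", ")),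
       d ++ String.join (l.map (fun v => "input " ++ (v ++ " ;\n")))) := by
  induction l generalizing a b c d with
  | nil => simp [String.join]
  | cons h t ih =>
      rw [List.foldl_cons, ih]
      simp only [List.map_cons, pv_join_cons, String.append_assoc]

-- the y-loop accumulates each component independently as accumulator ++ join-of-maps
theorem pv_foldlY (U : List String) (l : List String) (a b c d e f : String) :
    (l.foldl
      (fun (t : String × String × String × String × String × String) var =>
        (t.1 ++ (var ++ ", "),
         (if U.contains var then t.2.1 ++ (var ++ ", ") else t.2.1 ++ ("ip" ++ (var ++ ", "))),
         t.2.2.1 ++ (var ++ ", "),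
         t.2.2.2.1 ++ ("input " ++ (var ++ " ;\n")),
         t.2.2.2.2.1 ++ ("ip" ++ (var ++ ", ")),
         t.2.2.2.2.2 ++ ("input ip" ++ (var ++ " ;\n"))))
      (a, b, c, d, e, f))
    = (a ++ String.join (l.map (fun v => v ++ ", ")),
       b ++ String.join (l.map (fun v => if U.contains v then v ++ ", " else "ip" ++ (v ++ ", "))),
       c ++ String.join (l.map (fun v => v ++ ", ")),
       d ++ String.join (l.map (fun v => "input " ++ (v ++ " ;\n"))),
       e ++ String.join (l.map (fun v => "ip" ++ (v ++ ", "))),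
       f ++ String.join (l.map (fun v => "input ip" ++ (v ++ " ;\n")))) := by
  induction l generalizing a b c d e f with
  | nil => simp [String.join]
  | cons h t ih =>
      rw [List.foldl_cons]
      by_cases hm : U.contains h
      · simp only [hm, if_true]
        rw [ih]
        simp only [List.map_cons, hm, if_true, pv_join_cons, String.append_assoc]
      · simp only [hm, if_false, Bool.false_eq_true]
        rw [ih]
        simp only [List.map_cons, hm, Bool.false_eq_true, if_false, pv_join_cons,
          String.append_assoc]

-- membership in the PySem set equals membership in the original list
theorem pv_set_contains (U : List String) (v : String) :
    (PySem.Set.ofList U).contains v = U.contains v := by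
  by_cases h : v ∈ U <;>
    simp [PySem.Set.contains, PySem.Set.mem_ofList, h, List.contains_eq_mem]

-- join of the conditional skolem token group
theorem pv_join_nil : String.join ([] : List String) = "" := rfl

theorem pv_skolem_body (U : List String) (v : String) :
    String.join (if U.contains v then ([] : List String) else ["ip"]) ++ (v ++ ", ")
      = (if U.contains v then v ++ ", " else "ip" ++ (v ++ ", ")) := by
  by_cases h : v ∈ U <;> simp [h, List.contains_eq_mem, String.join]

-- ===== VERDICT =====
theorem createErrorFormula_spec : Claim_equal_createErrorFormula := by
  intro Xvar Yvar UniqueVars verilog_formula _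
  unfold Spec_createErrorFormula createErrorFormula createErrorFormula_alt
  simp only [pv_foldlX, pv_foldlY, pv_set_contains, pv_join_flatMap, pv_join_append,
    pv_join_cons, pv_join_nil, pv_skolem_body, String.append_assoc, String.empty_append,
    String.append_empty]
  rw [show ("output out;\nwire out1;\nwire out2;\nwire out3;\n" : String)
        = "output out;\n" ++ ("wire out1;\n" ++ ("wire out2;\n" ++ "wire out3;\n")) from rfl,
      show ("FORMULA F1 (" : String) = "FORMULA F1 " ++ "(" from rfl,
      show ("SKOLEMFORMULA F2 (" : String) = "SKOLEMFORMULA F2 " ++ "(" from rfl,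
      show ("FORMULA F2 (" : String) = "FORMULA F2 " ++ "(" from rfl,
      show ("assign out = ( out1 & out2 & ~(out3) );\nendmodule\n" : String)
        = "assign out = ( out1 & out2 & ~(out3) );\n" ++ "endmodule\n" from rfl]
  simp only [String.append_assoc]
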